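-- pv_equiv track=rewrite | github.com/Willem500i/DSA_Code | HW_4/wdn2012_hw4_q6.py | appearances
-- ===== SOURCE A (Python) =====
-- def appearances(s, low, high):
--     if len(s) == 0:
--         return {}
--     elif low == high:
--         return {s[low]:1}
--     else:
--         dic = appearances(s, low+1, high)
--         if s[low] in dic:
--             dic.update({s[low]: dic[s[low]] + 1})
--         else:
--             dic.update({s[low]:1})
--         return dic
-- ===== SOURCE B (Python) =====
-- def appearances(s, low, high):
--     if len(s) == 0:
--         return {}
--     dic = {}
--     for i in range(high, low - 1, -1):
--         dic[s[i]] = dic.get(s[i], 0) + 1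
--     return dic
-- ===== Notes on version B (the rewrite author's own statement) =====
-- stated objective: simpler
-- what changed: Replaces the bottom-up recursion (one stack frame per index) with a single iterative pass over range(high, low-1, -1) accumulating counts in a dict.
import Mathlib
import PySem

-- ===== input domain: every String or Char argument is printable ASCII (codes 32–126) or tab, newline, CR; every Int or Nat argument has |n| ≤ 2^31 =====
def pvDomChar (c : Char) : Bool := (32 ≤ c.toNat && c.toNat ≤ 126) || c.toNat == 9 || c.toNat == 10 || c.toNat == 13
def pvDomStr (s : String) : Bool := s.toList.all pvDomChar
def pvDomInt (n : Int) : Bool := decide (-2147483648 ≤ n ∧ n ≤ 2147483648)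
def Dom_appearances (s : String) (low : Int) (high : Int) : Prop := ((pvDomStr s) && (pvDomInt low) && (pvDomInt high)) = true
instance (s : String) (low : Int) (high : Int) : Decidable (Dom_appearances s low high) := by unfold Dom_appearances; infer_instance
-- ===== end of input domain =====

-- B replaces A's bottom-up recursion by one iterative pass over range(high, low-1, -1); return values proved equal on Pre_.

-- ===== PORT A =====
-- recursion of A; when low > high the Python recursion never returns (RecursionError, outside Pre_): the port returns an empty dict there
def appearancesRec (s : List Char) (low : Int) (high : Int) : PySem.Dict String Int :=
  if s.length = 0 then PySem.Dict.empty
  else if low = high then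
    match PySem.List.pyGet? s low with
    | some c => (PySem.Dict.empty : PySem.Dict String Int).insert (String.mk [c]) 1
    | none => PySem.Dict.empty          -- IndexError (outside Pre_)
  else if _h : low < high then
    let dic := appearancesRec s (low + 1) high
    match PySem.List.pyGet? s low with
    | some c =>
      let k := String.mk [c]
      if dic.contains k then dic.insert k (dic.getD k 0 + 1)
      else dic.insert k 1
    | none => dic                       -- IndexError (outside Pre_)
  else PySem.Dict.empty                 -- low > high: RecursionError (outside Pre_)
termination_by (high - low).toNat
decreasing_by omega

def appearances (s : String) (low : Int) (high : Int) : List (String × Int) :=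
  (appearancesRec s.toList low high).items

-- ===== PORT B =====
def appearances_alt (s : String) (low : Int) (high : Int) : List (String × Int) :=
  if s.toList.length = 0 then []
  else
    ((PySem.List.pyRange high (low - 1) (-1)).foldl
      (fun dic i =>
        match PySem.List.pyGet? s.toList i with
        | some c => dic.insert (String.mk [c]) (dic.getD (String.mk [c]) 0 + 1)
        | none => dic)                  -- IndexError (outside Pre_)
      (PySem.Dict.empty : PySem.Dict String Int)).items

-- ===== PRECONDITION & SPEC =====
-- Pre_: A returns normally iff s is empty, or low..high is a nonempty range of valid Python indices of s
def Pre_appearances (s : String) (low : Int) (high : Int) : Prop :=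
  s.toList.length = 0 ∨ (low ≤ high ∧ -(s.toList.length : Int) ≤ low ∧ high < (s.toList.length : Int))
instance (s : String) (low : Int) (high : Int) : Decidable (Pre_appearances s low high) := by unfold Pre_appearances; infer_instance
def pvWitness_appearances : String × Int × Int := ("aba", 0, 2)

def Spec_appearances (s : String) (low : Int) (high : Int) (out : List (String × Int)) : Prop := out = appearances_alt s low high
instance (s : String) (low : Int) (high : Int) (out : List (String × Int)) : Decidable (Spec_appearances s low high out) := by unfold Spec_appearances; infer_instance

-- ===== CLAIM (what is proved, stated in full; the proofs are below) =====
def Claim_equal_appearances : Prop := ∀ (s : String) (low : Int) (high : Int), Dom_appearances s low high → Pre_appearances s low high → Spec_appearances s low high (appearances s low high)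

-- ===== LEMMAS AND PROOFS =====

-- the backward range splits its last element off
lemma pyRange_neg_split (a b : Int) (h : b ≤ a) :
    PySem.List.pyRange a (b - 1) (-1) = PySem.List.pyRange a b (-1) ++ [b] := by
  rw [PySem.List.pyRange_neg_one_eq_reverse, PySem.List.pyRange_neg_one_eq_reverse,
    PySem.List.pyRange_one_cons (by omega : b - 1 + 1 < a + 1)]
  norm_num

-- A's recursion equals B's fold on valid nonempty index ranges
lemma rec_eq_fold (s : List Char) (low high : Int)
    (hle : low ≤ high) (hlo : -(s.length : Int) ≤ low) (hhi : high < (s.length : Int)) :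
    appearancesRec s low high =
      (PySem.List.pyRange high (low - 1) (-1)).foldl
        (fun dic i =>
          match PySem.List.pyGet? s i with
          | some c => dic.insert (String.mk [c]) (dic.getD (String.mk [c]) 0 + 1)
          | none => dic)
        (PySem.Dict.empty : PySem.Dict String Int) := by
  have hne : s.length ≠ 0 := by omega
  rw [pyRange_neg_split high low hle]
  cases hc : PySem.List.pyGet? s low with
  | none =>
    exfalso
    rw [PySem.List.pyGet?_eq_none_iff] at hc
    exact hc (by simp [PySem.Raise.InRange]; omega)
  | some c => ?_
  rcases eq_or_lt_of_le hle with rfl | hlt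
  · rw [appearancesRec]
    simp [hne, hc, PySem.List.pyRange_neg_one_eq_nil (le_refl low)]
  · rw [appearancesRec]
    have hih := rec_eq_fold s (low + 1) high (by omega) (by omega) hhi
    rw [show PySem.List.pyRange high (low + 1 - 1) (-1) = PySem.List.pyRange high low (-1) by congr 1; omega] at hih
    rw [if_neg (by omega : ¬ s.length = 0), if_neg (by omega : ¬ low = high), dif_pos hlt]
    simp only [hc, List.foldl_append, List.foldl_cons, List.foldl_nil, ← hih]
    by_cases hmem : (appearancesRec s (low + 1) high).contains (String.mk [c])
    · simp [hmem]
    · simp only [hmem]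
      rw [PySem.Dict.getD_of_not_contains (h := by simpa using hmem)]
      simp
termination_by (high - low).toNat
decreasing_by omega

-- ===== VERDICT (by name: the statement is the Claim_ definition above) =====
theorem appearances_spec : Claim_equal_appearances := by
  intro s low high _hdom hpre
  unfold Spec_appearances appearances appearances_alt
  rcases hpre with h0 | ⟨hle, hlo, hhi⟩
  · rw [appearancesRec]
    simp [h0, PySem.Dict.empty]
  · have hne : s.toList.length ≠ 0 := by omega
    simp only [hne, if_false]
    rw [rec_eq_fold s.toList low high hle hlo hhi]
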